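-- pv_equiv track=rewrite | github.com/PrasantaScripts/analyst_researcher_feedback | agents/researcher.py | _compact_search
-- ===== SOURCE A (Python) =====
-- def _compact_search(results: list, char_limit: int) -> str:
--     """Trim search results to stay under char_limit — saves input tokens."""
--     parts = []
--     total = 0
--     for r in results:
--         chunk = f"{r.get('url','')}\n{r.get('content','')[:300]}\n"
--         if total + len(chunk) > char_limit:
--             break
--         parts.append(chunk)
--         total += len(chunk)
--     return "\n".join(parts)
-- ===== SOURCE B (Python) =====
-- def _compact_search(results: list, char_limit: int) -> str:
--     """Trim search results to stay under char_limit — saves input tokens."""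
--     chunks = [f"{r.get('url','')}\n{r.get('content','')[:300]}\n" for r in results]
--     prefix = [0]
--     for c in chunks:
--         prefix.append(prefix[-1] + len(c))
--     # binary search (bisect_right by hand): lo ends as the number of prefix sums <= char_limit
--     lo, hi = 0, len(prefix)
--     while lo < hi:
--         mid = (lo + hi) // 2
--         if prefix[mid] <= char_limit:
--             lo = mid + 1
--         else:
--             hi = mid
--     return "\n".join(chunks[:max(lo - 1, 0)])
-- ===== Notes on version B (the rewrite author's own statement) =====
-- stated objective: alternative
-- what changed: B first builds a prefix-sum table of chunk lengths and then finds the cut-off index by a hand-written binary search (bisect_right) over it, instead of A's single running-total loop with break.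
import Mathlib
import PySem

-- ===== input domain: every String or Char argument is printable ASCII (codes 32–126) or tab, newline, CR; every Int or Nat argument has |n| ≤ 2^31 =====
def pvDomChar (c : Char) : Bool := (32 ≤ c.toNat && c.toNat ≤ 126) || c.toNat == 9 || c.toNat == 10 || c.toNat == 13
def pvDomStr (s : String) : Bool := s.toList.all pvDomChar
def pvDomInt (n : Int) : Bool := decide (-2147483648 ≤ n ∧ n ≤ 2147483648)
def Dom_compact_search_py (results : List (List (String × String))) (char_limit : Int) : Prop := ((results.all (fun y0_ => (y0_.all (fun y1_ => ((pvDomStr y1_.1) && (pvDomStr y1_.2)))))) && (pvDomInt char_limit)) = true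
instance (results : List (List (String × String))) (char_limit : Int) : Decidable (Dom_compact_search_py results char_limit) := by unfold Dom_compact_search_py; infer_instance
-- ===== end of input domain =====

-- B replaces A's running-total loop with break by a prefix-sum table plus a binary search
-- (hand-written bisect_right) for the cut-off index; same overall cost, different algorithm.

-- ===== PORT A =====
-- the f-string chunk: f"{r.get('url','')}\n{r.get('content','')[:300]}\n"  (shared: both Pythons build the same chunk)
def pvChunk (r : List (String × String)) : List Char :=
  (PySem.Dict.getD (PySem.Dict.mk r) "url" "").toList
    ++ '\n' :: PySem.Chars.slice (PySem.Dict.getD (PySem.Dict.mk r) "content" "").toList none (some 300)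
    ++ ['\n']

-- A's for-loop with break, as structural recursion over (total, parts)
def pvLoopA (char_limit : Int) : List (List (String × String)) → Int → List (List Char) → List (List Char)
  | [], _, parts => parts
  | r :: rest, total, parts =>
    let chunk := pvChunk r
    if total + (chunk.length : Int) > char_limit then parts
    else pvLoopA char_limit rest (total + (chunk.length : Int)) (parts ++ [chunk])

def compact_search_py (results : List (List (String × String))) (char_limit : Int) : String :=
  String.mk (PySem.Chars.join ['\n'] (pvLoopA char_limit results 0 []))

-- ===== PORT B =====
-- the `for c in chunks: prefix.append(prefix[-1] + len(c))` loop
def pvBuildPrefix : List (List Char) → List Int → List Int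
  | [], pre => pre
  | c :: cs, pre => pvBuildPrefix cs (pre ++ [pre.getLastD 0 + (c.length : Int)])

-- the `while lo < hi` binary search (bisect_right by hand); a[mid] is prefix[mid], always in range
def pvBisect (a : List Int) (x : Int) (lo hi : Nat) : Nat :=
  if _h : lo < hi then
    let mid := (lo + hi) / 2
    if a.getD mid 0 ≤ x then pvBisect a x (mid + 1) hi else pvBisect a x lo mid
  else lo
termination_by hi - lo
decreasing_by all_goals omega

def compact_search_py_alt (results : List (List (String × String))) (char_limit : Int) : String :=
  let chunks := results.map pvChunk
  let pre := pvBuildPrefix chunks [0]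
  let lo := pvBisect pre char_limit 0 pre.length
  -- chunks[:max(lo-1, 0)] — slice with a nonnegative bound = take
  String.mk (PySem.Chars.join ['\n'] (chunks.take (max ((lo : Int) - 1) 0).toNat))

-- ===== PRECONDITION & SPEC =====
def Spec_compact_search_py (results : List (List (String × String))) (char_limit : Int) (out : String) : Prop := out = compact_search_py_alt results char_limit
instance (results : List (List (String × String))) (char_limit : Int) (out : String) : Decidable (Spec_compact_search_py results char_limit out) := by unfold Spec_compact_search_py; infer_instance

-- ===== CLAIM (what is proved, stated in full; the proofs are below) =====
def Claim_equal_compact_search_py : Prop := ∀ (results : List (List (String × String))) (char_limit : Int), Dom_compact_search_py results char_limit → Spec_compact_search_py results char_limit (compact_search_py results char_limit)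

-- ===== LEMMAS AND PROOFS =====

-- cumulative sums of a list starting after offset acc (proof-side abstraction)
def pvCumsum : List Int → Int → List Int
  | [], _ => []
  | x :: xs, acc => (acc + x) :: pvCumsum xs (acc + x)

-- A's loop keeps exactly the prefix of chunks whose cumulative length stays within the limit
theorem pvLoopA_eq (char_limit : Int) (rs : List (List (String × String)))
    (total : Int) (parts : List (List Char)) :
    pvLoopA char_limit rs total parts
      = parts ++ (rs.map pvChunk).take
          ((pvCumsum ((rs.map pvChunk).map (fun c => (c.length : Int))) total).takeWhile
            (fun v => decide (v ≤ char_limit))).length := by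
  induction rs generalizing total parts with
  | nil => simp [pvLoopA, pvCumsum]
  | cons r rest ih =>
    simp only [pvLoopA, List.map_cons, pvCumsum, List.takeWhile_cons]
    by_cases h : total + ((pvChunk r).length : Int) > char_limit
    · simp [h, not_le.mpr h]
    · have h' : total + ((pvChunk r).length : Int) ≤ char_limit := not_lt.mp h
      simp [h, h', ih]

theorem pvBuildPrefix_eq (cs : List (List Char)) (pre : List Int) (v : Int) :
    pvBuildPrefix cs (pre ++ [v])
      = pre ++ v :: pvCumsum (cs.map (fun c => (c.length : Int))) v := by
  induction cs generalizing pre v with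
  | nil => simp [pvBuildPrefix, pvCumsum]
  | cons c cs ih =>
    simp only [pvBuildPrefix, List.map_cons, pvCumsum]
    rw [List.getLastD_concat, ih (pre ++ [v]) (v + (c.length : Int))]
    simp

-- the binary search returns the unique boundary b splitting a into (≤ x) then (> x)
theorem pvBisect_eq (a : List Int) (x : Int) (b : Nat)
    (h1 : ∀ i < b, a.getD i 0 ≤ x) (h2 : ∀ i, b ≤ i → i < a.length → x < a.getD i 0) :
    ∀ lo hi, lo ≤ b → b ≤ hi → hi ≤ a.length → pvBisect a x lo hi = b := by
  intro lo hi hlb hbh hh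
  rw [pvBisect]
  by_cases h : lo < hi
  · simp only [dif_pos h]
    by_cases hm : a.getD ((lo + hi) / 2) 0 ≤ x
    · have : (lo + hi) / 2 < b := by
        by_contra hc
        exact absurd (h2 _ (by omega) (by omega)) (not_lt.mpr hm)
      simp only [if_pos hm]
      exact pvBisect_eq a x b h1 h2 _ hi (by omega) hbh hh
    · have : b ≤ (lo + hi) / 2 := by
        by_contra hc
        exact hm (h1 _ (by omega))
      simp only [if_neg hm]
      exact pvBisect_eq a x b h1 h2 lo _ hlb this (by omega)
  · simp only [dif_neg h]; omega
termination_by lo hi => hi - lo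
decreasing_by all_goals omega

-- boundary facts for takeWhile (· ≤ x) on a nondecreasing (Chain' ≤) list
theorem takeWhile_bounds (x : Int) : ∀ (l : List Int), l.IsChain (· ≤ ·) →
    (∀ i < (l.takeWhile (fun v => decide (v ≤ x))).length, l.getD i 0 ≤ x) ∧
    (∀ i, (l.takeWhile (fun v => decide (v ≤ x))).length ≤ i → i < l.length → x < l.getD i 0) := by
  intro l
  induction l with
  | nil => intro _; constructor <;> intro i <;> simp
  | cons a l ih =>
    intro hch
    rw [List.isChain_cons] at hch
    obtain ⟨hhd, hch'⟩ := hch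
    obtain ⟨ih1, ih2⟩ := ih hch'
    by_cases ha : a ≤ x
    · simp only [List.takeWhile_cons, ha, decide_true, if_true]
      constructor
      · intro i hi
        cases i with
        | zero => simpa using ha
        | succ j => simp only [List.length_cons] at hi ⊢; exact ih1 j (by omega)
      · intro i hi hil
        cases i with
        | zero => simp at hi
        | succ j =>
          simp only [List.length_cons] at hi hil
          exact ih2 j (by omega) (by omega)
    · have hxa : x < a := not_le.mp ha
      simp only [List.takeWhile_cons, ha, decide_false, Bool.false_eq_true, if_false,
        List.length_nil]
      have htl0 : (l.takeWhile (fun v => decide (v ≤ x))).length = 0 := by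
        cases l with
        | nil => simp
        | cons c l' =>
          have hac : a ≤ c := hhd c rfl
          simp [List.takeWhile_cons, not_le.mpr (lt_of_lt_of_le hxa hac)]
      constructor
      · intro i hi; omega
      · intro i _ hil
        cases i with
        | zero => simpa using hxa
        | succ j =>
          simp only [List.length_cons] at hil
          exact ih2 j (by omega) (by omega)

-- pvCumsum of nonnegative values, prefixed with its offset, is nondecreasing
theorem chain_cumsum (l : List Int) (acc : Int) (hnn : ∀ v ∈ l, 0 ≤ v) :
    (acc :: pvCumsum l acc).IsChain (· ≤ ·) := by
  induction l generalizing acc with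
  | nil => exact List.isChain_singleton acc
  | cons v l ih =>
    simp only [pvCumsum]
    refine List.isChain_cons.mpr ⟨?_, ih (acc + v) (fun w hw => hnn w (by simp [hw]))⟩
    intro y hy
    simp only [List.head?_cons, Option.mem_def, Option.some.injEq] at hy
    subst hy
    have := hnn v (by simp)
    omega

theorem compact_search_py_spec_aux (results : List (List (String × String))) (char_limit : Int) :
    compact_search_py results char_limit = compact_search_py_alt results char_limit := by
  simp only [compact_search_py, compact_search_py_alt]
  rw [pvLoopA_eq]
  set chunks := results.map pvChunk with hchunks
  set lens := chunks.map (fun c => (c.length : Int)) with hlens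
  have hpre : pvBuildPrefix chunks [0] = 0 :: pvCumsum lens 0 := by
    simpa using pvBuildPrefix_eq chunks [] 0
  rw [hpre]
  have hnn : ∀ v ∈ lens, 0 ≤ v := by
    intro v hv
    simp only [hlens, List.mem_map] at hv
    obtain ⟨c, _, rfl⟩ := hv
    exact Int.natCast_nonneg _
  have hch : (0 :: pvCumsum lens 0).Chain' (· ≤ ·) := chain_cumsum lens 0 hnn
  set b := ((0 :: pvCumsum lens 0).takeWhile (fun v => decide (v ≤ char_limit))).length with hb
  obtain ⟨h1, h2⟩ := takeWhile_bounds char_limit _ hch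
  have hblen : b ≤ (0 :: pvCumsum lens 0).length := by
    rw [hb]; exact (List.takeWhile_sublist _).length_le
  rw [pvBisect_eq _ char_limit b h1 h2 0 _ (Nat.zero_le _) hblen le_rfl]
  congr 2
  by_cases hx : (0 : Int) ≤ char_limit
  · have : b = ((pvCumsum lens 0).takeWhile (fun v => decide (v ≤ char_limit))).length + 1 := by
      simp [hb, List.takeWhile_cons, hx]
    rw [this]
    have h' : ((((pvCumsum lens 0).takeWhile (fun v => decide (v ≤ char_limit))).length + 1 : Nat) : Int) - 1
        = (((pvCumsum lens 0).takeWhile (fun v => decide (v ≤ char_limit))).length : Int) := by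
      push_cast; ring
    rw [h', max_eq_left (Int.natCast_nonneg _), Int.toNat_natCast]
    simp
  · have hb0 : b = 0 := by
      simp [hb, List.takeWhile_cons, hx]
    have hj : ((pvCumsum lens 0).takeWhile (fun v => decide (v ≤ char_limit))).length = 0 := by
      cases hl : lens with
      | nil => simp [pvCumsum]
      | cons v l' =>
        have hv : 0 ≤ v := hnn v (by simp [hl])
        simp only [pvCumsum, List.takeWhile_cons]
        rw [if_neg (by simp; omega)]
        simp
    rw [hb0, hj]
    simp

-- ===== VERDICT (by name: the statement is the Claim_ definition above) =====
theorem compact_search_py_spec : Claim_equal_compact_search_py := by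
  intro results char_limit _
  exact compact_search_py_spec_aux results char_limit
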